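-- pv_equiv track=rewrite | github.com/lse-ds105/ds105a-2024-w06-summative-so-hl | code/my_functions.py | add_cities
-- ===== SOURCE A (Python) =====
-- def add_cities(data):
--     save_dict = {}
--     for rain in data.values():
--         for time, values in rain.items():
--             if time not in save_dict:
--                 save_dict[time] = values
--             else:
--                 save_dict[time] += values
--     return save_dict
-- ===== SOURCE B (Python) =====
-- def add_cities(data):
--     # Flatten, dedupe times in first-seen order, then sum values per time.
--     pairs = [tv for rain in data.values() for tv in rain.items()]
--     times = dict.fromkeys(t for t, _ in pairs)
--     return {t: sum(v for t2, v in pairs if t2 == t) for t in times}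
-- ===== Notes on version B (the rewrite author's own statement) =====
-- stated objective: alternative
-- what changed: Replaces A's single running-total dict (insert-or-+= per item) with a dict-free pipeline: flatten all (time, value) pairs, dedupe the times in first-seen order, then compute each time's total by a filter-and-sum scan over the flat pair list.
import Mathlib
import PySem

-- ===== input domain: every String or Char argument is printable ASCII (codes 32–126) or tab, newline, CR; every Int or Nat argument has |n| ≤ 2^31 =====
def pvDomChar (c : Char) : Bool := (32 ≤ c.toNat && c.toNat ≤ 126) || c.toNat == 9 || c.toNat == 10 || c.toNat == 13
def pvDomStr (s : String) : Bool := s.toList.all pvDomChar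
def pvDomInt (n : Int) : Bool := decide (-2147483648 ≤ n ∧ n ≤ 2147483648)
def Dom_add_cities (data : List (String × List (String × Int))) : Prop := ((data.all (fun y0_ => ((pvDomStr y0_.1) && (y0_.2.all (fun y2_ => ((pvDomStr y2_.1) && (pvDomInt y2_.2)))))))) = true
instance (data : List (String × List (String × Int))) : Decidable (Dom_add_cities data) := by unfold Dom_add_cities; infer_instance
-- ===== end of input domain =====

-- B replaces A's incremental running-total dict with flatten + ordered key dedup + per-key filter-and-sum (objective: alternative).

-- ===== PORT A =====
-- A: one dict of running totals; first occurrence of a time inserts, later ones do `+=`.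
def add_cities (data : List (String × List (String × Int))) : List (String × Int) :=
  (data.foldl (fun save_dict rain =>
      rain.2.foldl (fun save_dict tv =>
          if save_dict.contains tv.1 = false then
            save_dict.insert tv.1 tv.2
          else
            -- save_dict[time] += values  ==  save_dict[time] = save_dict[time] + values
            save_dict.modify tv.1 0 (· + tv.2)) save_dict)
    (PySem.Dict.empty : PySem.Dict String Int)).items

-- ===== PORT B =====
-- B: flatten all (time, value) pairs, dedupe the times keeping first-seen order
-- (dict.fromkeys = PySem.List.dedup), then for each time sum the matching values.
def add_cities_alt (data : List (String × List (String × Int))) : List (String × Int) :=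
  let pairs := data.flatMap (fun rain => rain.2)
  let times := PySem.List.dedup (pairs.map Prod.fst)
  times.map (fun t => (t, ((pairs.filter (fun p => p.1 == t)).map Prod.snd).sum))

-- ===== PRECONDITION & SPEC =====
def Spec_add_cities (data : List (String × List (String × Int))) (out : List (String × Int)) : Prop := out = add_cities_alt data
instance (data : List (String × List (String × Int))) (out : List (String × Int)) : Decidable (Spec_add_cities data out) := by unfold Spec_add_cities; infer_instance

-- ===== CLAIM (what is proved, stated in full; the proofs are below) =====
def Claim_equal_add_cities : Prop := ∀ (data : List (String × List (String × Int))), Dom_add_cities data → Spec_add_cities data (add_cities data)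

-- ===== LEMMAS AND PROOFS =====

/-- A's insert-or-`+=` step is one unconditional `modify` (a missing key appends with default 0). -/
theorem pvStep_eq_modify (d : PySem.Dict String Int) (tv : String × Int) :
    (if d.contains tv.1 = false then d.insert tv.1 tv.2 else d.modify tv.1 0 (· + tv.2))
      = d.modify tv.1 0 (· + tv.2) := by
  by_cases h : d.contains tv.1
  · simp [h]
  · have hF : d.contains tv.1 = false := by simpa using h
    simp [hF, PySem.Dict.modify, PySem.Dict.getD_of_not_contains d 0 hF]

/-- Running-total value after the modify loop: old value plus the sum of matching pairs. -/
theorem pvGetD_fold_add (l : List (String × Int)) (d : PySem.Dict String Int) (c : String) :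
    (l.foldl (fun d p => d.modify p.1 0 (· + p.2)) d).getD c 0
      = d.getD c 0 + ((l.filter (fun p => p.1 == c)).map Prod.snd).sum := by
  induction l generalizing d with
  | nil => simp
  | cons p rest ih =>
    simp only [List.foldl_cons, ih, List.filter_cons]
    by_cases h : p.1 = c
    · simp [h, PySem.Dict.getD_modify_self]
      ring
    · have hb : (p.1 == c) = false := by simpa using h
      simp [hb, PySem.Dict.getD_modify, Ne.symm h]

-- ===== VERDICT (by name: the statement is the Claim_ definition above) =====
theorem add_cities_spec : Claim_equal_add_cities := by
  intro data _
  unfold Spec_add_cities add_cities add_cities_alt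
  -- the two nested loops are one loop over the flattened pair list, each step a modify
  have hflat :
      data.foldl (fun save_dict rain =>
          rain.2.foldl (fun save_dict tv =>
              if save_dict.contains tv.1 = false then save_dict.insert tv.1 tv.2
              else save_dict.modify tv.1 0 (· + tv.2)) save_dict)
        (PySem.Dict.empty : PySem.Dict String Int)
        = (data.flatMap (fun rain => rain.2)).foldl
            (fun d p => d.modify p.1 0 (· + p.2)) PySem.Dict.empty := by
    rw [List.flatMap, List.foldl_flatten, List.foldl_map]
    apply PySem.List.foldl_congr_mem
    intro d rain _
    apply PySem.List.foldl_congr_mem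
    intro d' tv _
    exact pvStep_eq_modify d' tv
  rw [hflat]
  set pairs := data.flatMap (fun rain => rain.2) with hpairs
  have hnd : (pairs.foldl (fun d p => d.modify p.1 0 (· + p.2))
      (PySem.Dict.empty : PySem.Dict String Int)).keys.Nodup :=
    PySem.Dict.nodup_keys_foldl_modify_key pairs Prod.fst 0 _ _
      PySem.Dict.nodup_keys_empty
  rw [PySem.Dict.items_eq_map_keys _ hnd 0,
    PySem.Dict.keys_foldl_modify_key]
  simp only [PySem.Dict.keys_empty, PySem.Set.update_nil_left, PySem.List.dedup_eq_ofList]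
  apply List.map_congr_left
  intro t _
  rw [pvGetD_fold_add]
  simp
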